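-- pv_equiv track=rewrite | github.com/hroncok/python-brainfuck | image_png.py | _paeth_predictor
-- ===== SOURCE A (Python) =====
-- def _paeth_predictor(a,b,c):
--     """Peath predicator from W3C spec."""
--     # a = left, b = above, c = upper left
--     res = tuple()
--     for i in range(0,3):
--         p = (a[i]+b[i]-c[i]) # initial estimate
--         pa = abs(p-a[i]) # distances to a, b, c
--         pb = abs(p-b[i])
--         pc = abs(p-c[i])
--
--
--         # return nearest of a,b,c,
--         # breaking ties in order a,b,c.
--         if (pa <= pb and pa <= pc):
--             res += (a[i],)
--         elif (pb <= pc):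
--             res += (b[i],)
--         else:
--             res += (c[i],)
--     return res
-- ===== SOURCE B (Python) =====
-- def _paeth_channel(x, y, z):
--     # Threshold form of the Paeth predictor (as in stb_image): no p, no abs.
--     thresh = 3 * z - x - y
--     lo, hi = (x, y) if x <= y else (y, x)
--     if thresh <= lo:
--         return hi
--     if hi <= thresh:
--         return lo
--     return z
--
--
-- def _paeth_predictor(a, b, c):
--     return (_paeth_channel(a[0], b[0], c[0]),
--             _paeth_channel(a[1], b[1], c[1]),
--             _paeth_channel(a[2], b[2], c[2]))
-- ===== Notes on version B (the rewrite author's own statement) =====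
-- stated objective: alternative
-- what changed: Replaces the distance computation (p=a+b-c and three abs distances with an if/elif/else nearest pick) by the branch-reduced threshold form used in stb_image: per channel compute thresh=3c-a-b and lo/hi=min/max(a,b), return hi if thresh<=lo, lo if hi<=thresh, else c; no predictor p and no absolute values are computed, and the triple is built directly instead of by tuple concatenation in a range loop.
import Mathlib
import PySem

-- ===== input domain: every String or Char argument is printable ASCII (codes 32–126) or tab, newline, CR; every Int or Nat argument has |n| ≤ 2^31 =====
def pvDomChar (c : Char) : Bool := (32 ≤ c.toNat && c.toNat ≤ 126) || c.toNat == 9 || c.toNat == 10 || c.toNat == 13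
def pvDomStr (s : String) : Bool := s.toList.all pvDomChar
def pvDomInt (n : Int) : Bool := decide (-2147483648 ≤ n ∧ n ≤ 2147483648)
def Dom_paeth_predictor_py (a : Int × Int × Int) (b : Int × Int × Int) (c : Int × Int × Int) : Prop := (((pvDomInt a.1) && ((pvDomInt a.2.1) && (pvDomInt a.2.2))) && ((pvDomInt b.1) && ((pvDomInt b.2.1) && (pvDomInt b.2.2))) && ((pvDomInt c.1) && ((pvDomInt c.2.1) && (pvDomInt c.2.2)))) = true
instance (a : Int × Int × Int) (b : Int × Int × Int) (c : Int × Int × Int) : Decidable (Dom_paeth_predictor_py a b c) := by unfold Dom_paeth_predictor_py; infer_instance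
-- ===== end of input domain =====

-- B: the branch-reduced threshold form of the Paeth predictor (thresh = 3c-a-b with min/max of a,b), no p and no abs, instead of A's distance-based if/elif/else over a range loop.


-- ===== PORT A =====
def pvIdx3 (t : Int × Int × Int) (i : Int) : Int :=
  if i = 0 then t.1 else if i = 1 then t.2.1 else t.2.2

-- faithful port of A: loop over range(0,3) accumulating the result tuple (as a list),
-- then packed into the Int × Int × Int triple (the loop always produces 3 elements)
def paeth_predictor_py (a : Int × Int × Int) (b : Int × Int × Int) (c : Int × Int × Int) : Int × Int × Int :=
  let res := (PySem.List.pyRange 0 3).foldl (fun (res : List Int) (i : Int) =>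
    let p := pvIdx3 a i + pvIdx3 b i - pvIdx3 c i
    let pa := |p - pvIdx3 a i|
    let pb := |p - pvIdx3 b i|
    let pc := |p - pvIdx3 c i|
    if pa ≤ pb ∧ pa ≤ pc then res ++ [pvIdx3 a i]
    else if pb ≤ pc then res ++ [pvIdx3 b i]
    else res ++ [pvIdx3 c i]) []
  match res with
  | [x, y, z] => (x, y, z)
  | _ => (0, 0, 0)

-- ===== PORT B =====
def pvPaethChannel (x y z : Int) : Int :=
  let thresh := 3 * z - x - y
  let lohi := if x ≤ y then (x, y) else (y, x)
  if thresh ≤ lohi.1 then lohi.2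
  else if lohi.2 ≤ thresh then lohi.1
  else z

def paeth_predictor_py_alt (a : Int × Int × Int) (b : Int × Int × Int) (c : Int × Int × Int) : Int × Int × Int :=
  (pvPaethChannel a.1 b.1 c.1, pvPaethChannel a.2.1 b.2.1 c.2.1, pvPaethChannel a.2.2 b.2.2 c.2.2)

-- ===== PRECONDITION & SPEC =====
def Spec_paeth_predictor_py (a : Int × Int × Int) (b : Int × Int × Int) (c : Int × Int × Int) (out : Int × Int × Int) : Prop := out = paeth_predictor_py_alt a b c
instance (a : Int × Int × Int) (b : Int × Int × Int) (c : Int × Int × Int) (out : Int × Int × Int) : Decidable (Spec_paeth_predictor_py a b c out) := by unfold Spec_paeth_predictor_py; infer_instance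

-- ===== CLAIM =====
def Claim_equal_paeth_predictor_py : Prop := ∀ (a : Int × Int × Int) (b : Int × Int × Int) (c : Int × Int × Int), Dom_paeth_predictor_py a b c → Spec_paeth_predictor_py a b c (paeth_predictor_py a b c)

-- ===== LEMMAS AND PROOFS =====

def pvChanA (x y z : Int) : Int :=
  if |x + y - z - x| ≤ |x + y - z - y| ∧ |x + y - z - x| ≤ |x + y - z - z| then x
  else if |x + y - z - y| ≤ |x + y - z - z| then y else z

lemma pvPortA_eq (a b c : Int × Int × Int) :
    paeth_predictor_py a b c =
      (pvChanA a.1 b.1 c.1, pvChanA a.2.1 b.2.1 c.2.1, pvChanA a.2.2 b.2.2 c.2.2) := by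
  have hr : PySem.List.pyRange 0 3 = [0, 1, 2] := by decide
  simp only [paeth_predictor_py, hr, List.foldl, pvIdx3, pvChanA]
  norm_num
  split_ifs <;> rfl

lemma pvChannel_eq (x y z : Int) : pvChanA x y z = pvPaethChannel x y z := by
  simp only [pvChanA, pvPaethChannel]
  rcases abs_cases (x + y - z - x) with ⟨e1, h1⟩ | ⟨e1, h1⟩ <;>
    rcases abs_cases (x + y - z - y) with ⟨e2, h2⟩ | ⟨e2, h2⟩ <;>
      rcases abs_cases (x + y - z - z) with ⟨e3, h3⟩ | ⟨e3, h3⟩ <;>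
        rw [e1, e2, e3] <;> split_ifs <;> omega

-- ===== VERDICT =====
theorem paeth_predictor_py_spec : Claim_equal_paeth_predictor_py := by
  intro a b c _
  show paeth_predictor_py a b c = paeth_predictor_py_alt a b c
  rw [pvPortA_eq]
  simp only [paeth_predictor_py_alt, pvChannel_eq]
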